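-- pv_equiv track=rewrite | github.com/andrea-00/project-work | src/gold_collection/solvers/genetic/split.py | predecessors_to_segments
-- ===== SOURCE A (Python) =====
-- from typing import List, Tuple
--
-- def predecessors_to_segments(
--     tour: List[int], predecessors: List[int]
-- ) -> List[List[int]]:
--     """
--     Convert predecessor array to list of trip segments.
--
--     Args:
--         tour: Original tour
--         predecessors: Predecessor array from optimal_split
--
--     Returns:
--         List of trip segments (each segment is a list of city indices)
--     """
--     if not tour or predecessors is None or len(predecessors) != len(tour) + 1:
--         return []
--
--     segments: List[List[int]] = []
--     curr = len(tour)
--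
--     while curr > 0:
--         prev = predecessors[curr]
--         seg = tour[prev:curr]
--         segments.append(seg)
--         curr = prev
--
--     segments.reverse()
--     return segments
-- ===== SOURCE B (Python) =====
-- from typing import List
--
--
-- def predecessors_to_segments(
--     tour: List[int], predecessors: List[int]
-- ) -> List[List[int]]:
--     if not tour or predecessors is None or len(predecessors) != len(tour) + 1:
--         return []
--
--     # collect the break positions of the optimal split as a set
--     cut = set()
--     c = len(tour)
--     while c > 0:
--         cut.add(c)
--         c = predecessors[c]
--
--     # single forward pass over the tour, starting a new segment at each break
--     segments: List[List[int]] = []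
--     seg: List[int] = []
--     for i, city in enumerate(tour):
--         if i in cut:
--             segments.append(seg)
--             seg = []
--         seg.append(city)
--     segments.append(seg)
--     return segments
-- ===== Notes on version B (the rewrite author's own statement) =====
-- stated objective: alternative
-- what changed: B replaces A's backward slice-and-reverse construction by a set of break positions plus one forward element-by-element scan of the tour: the chain walk only records cut indices into a set, and the segments are then grown city by city in final order, never slicing and never reversing.
-- outside the precondition, e.g. on predecessors_to_segments([1, 2], [0, 9, -1]): A returns [[2]], B returns [[1, 2]]; on predecessors_to_segments([1, 2], [0, 5, 0]): A returns [[1, 2]], B returns [[1, 2]]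
import Mathlib
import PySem

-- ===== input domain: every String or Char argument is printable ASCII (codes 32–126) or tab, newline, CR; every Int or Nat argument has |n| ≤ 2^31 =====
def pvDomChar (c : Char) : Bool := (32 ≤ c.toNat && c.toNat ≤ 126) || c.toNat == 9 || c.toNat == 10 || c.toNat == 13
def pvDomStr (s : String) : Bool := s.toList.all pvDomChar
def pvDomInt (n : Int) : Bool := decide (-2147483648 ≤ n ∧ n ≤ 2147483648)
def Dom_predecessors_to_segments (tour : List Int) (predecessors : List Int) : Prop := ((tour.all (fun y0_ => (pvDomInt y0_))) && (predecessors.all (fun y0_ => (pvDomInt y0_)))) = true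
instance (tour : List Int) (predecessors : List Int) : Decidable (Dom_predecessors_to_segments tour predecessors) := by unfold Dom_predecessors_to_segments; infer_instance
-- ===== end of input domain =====

-- B replaces A's backward slice-and-reverse walk by a set of break positions plus one
-- forward element-by-element scan of the tour (alternative decomposition, same cost).

-- ===== PORT A =====
-- A's while loop: `prev = predecessors[curr]; segments.append(tour[prev:curr]); curr = prev`.
-- The `none` and `¬ prev < curr` fallbacks are totality guards only: inside Pre_ the index is
-- always in range and the chain strictly decreases (on other inputs Python raises or loops).
def pvWalkA (tour predecessors : List Int) (curr : Int) (segments : List (List Int)) : List (List Int) :=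
  if 0 < curr then
    match PySem.List.pyGet? predecessors curr with
    | none => segments
    | some prev =>
      if _h : prev < curr then
        pvWalkA tour predecessors prev (segments ++ [PySem.List.slice tour (some prev) (some curr)])
      else segments
  else segments
termination_by curr.toNat
decreasing_by omega

def predecessors_to_segments (tour : List Int) (predecessors : List Int) : List (List Int) :=
  if tour = [] ∨ predecessors.length ≠ tour.length + 1 then []
  else (pvWalkA tour predecessors (tour.length : Int) []).reverse

-- ===== PORT B =====
-- B's first loop: `while c > 0: cut.add(c); c = predecessors[c]` (same totality guards as A's walk).
def pvCutB (predecessors : List Int) (c : Int) (s : PySem.Set Int) : PySem.Set Int :=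
  if 0 < c then
    match PySem.List.pyGet? predecessors c with
    | none => PySem.Set.add s c
    | some p =>
      if _h : p < c then pvCutB predecessors p (PySem.Set.add s c) else PySem.Set.add s c
  else s
termination_by c.toNat
decreasing_by omega

-- B's second loop: `for i, city in enumerate(tour): if i in cut: segments.append(seg); seg = []
--                   seg.append(city)` and finally `segments.append(seg)`.
def predecessors_to_segments_alt (tour : List Int) (predecessors : List Int) : List (List Int) :=
  if tour = [] ∨ predecessors.length ≠ tour.length + 1 then []
  else
    let cut := pvCutB predecessors (tour.length : Int) PySem.Set.empty
    let r := (PySem.List.enumerate tour).foldl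
      (fun st p =>
        let st' := if PySem.Set.contains cut p.1 then (st.1 ++ [st.2], ([] : List Int)) else st
        (st'.1, st'.2 ++ [p.2]))
      (([] : List (List Int)), ([] : List Int))
    r.1 ++ [r.2]

-- ===== PRECONDITION & SPEC =====
-- Pre_ admits every input the guard rejects, and otherwise restricts to predecessor arrays with
-- 0 <= predecessors[i] < i for 1 <= i <= len(tour) (the shape optimal_split produces). Outside
-- this A may loop forever (predecessors[i] == i), raise IndexError, or — via a negative entry —
-- return a segment sliced with Python's negative-index wraparound; whether the walk even
-- terminates depends on the whole iterated chain, which is not a checkable input shape, so the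
-- quantifier also drops some arrays whose off-chain entries are bad but on which both programs
-- still agree.
def Pre_predecessors_to_segments (tour : List Int) (predecessors : List Int) : Prop :=
  tour = [] ∨ predecessors.length ≠ tour.length + 1 ∨
    (∀ i : Nat, i < predecessors.length → 0 < i →
      0 ≤ predecessors.getD i 0 ∧ predecessors.getD i 0 < (i : Int))
instance (tour : List Int) (predecessors : List Int) : Decidable (Pre_predecessors_to_segments tour predecessors) := by unfold Pre_predecessors_to_segments; infer_instance

def pvWitness_predecessors_to_segments : List Int × List Int := ([7, 8, 9], [0, 0, 1, 2])

def Spec_predecessors_to_segments (tour : List Int) (predecessors : List Int) (out : List (List Int)) : Prop := out = predecessors_to_segments_alt tour predecessors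
instance (tour : List Int) (predecessors : List Int) (out : List (List Int)) : Decidable (Spec_predecessors_to_segments tour predecessors out) := by unfold Spec_predecessors_to_segments; infer_instance

-- ===== CLAIM (what is proved, stated in full; the proofs are below) =====
def Claim_equal_predecessors_to_segments : Prop := ∀ (tour : List Int) (predecessors : List Int), Dom_predecessors_to_segments tour predecessors → Pre_predecessors_to_segments tour predecessors → Spec_predecessors_to_segments tour predecessors (predecessors_to_segments tour predecessors)

-- ===== LEMMAS AND PROOFS =====

-- ghost: the boundary chain n, predecessors[n], ..., 0 (same totality guards as the ports)
def pvChain (predecessors : List Int) (c : Int) : List Int :=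
  if 0 < c then
    match PySem.List.pyGet? predecessors c with
    | none => [c]
    | some p => if _h : p < c then c :: pvChain predecessors p else [c]
  else [c]
termination_by c.toNat
decreasing_by omega

-- ghost: the segments obtained by cutting `xs` (whose first index is `a`) before each cut index
def pvSplit : List Int → Int → List Int → List Int → List (List Int)
  | [], _, xs, seg => [seg ++ xs]
  | c :: rest, a, xs, seg =>
    match xs.drop (c - a).toNat with
    | [] => [seg ++ xs]
    | x :: t => (seg ++ xs.take (c - a).toNat) :: pvSplit rest (c + 1) t [x]

theorem pvWalkA_acc (tour predecessors : List Int) (curr : Int) (s : List (List Int)) :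
    pvWalkA tour predecessors curr s = s ++ pvWalkA tour predecessors curr [] := by
  conv_lhs => rw [pvWalkA]
  conv_rhs => rw [pvWalkA]
  by_cases hc : 0 < curr
  · simp only [hc, if_true]
    cases hg : PySem.List.pyGet? predecessors curr with
    | none => simp
    | some prev =>
      by_cases hlt : prev < curr
      · simp only [hlt, dif_pos]
        rw [pvWalkA_acc tour predecessors prev (s ++ _),
            pvWalkA_acc tour predecessors prev ([] ++ _)]
        simp
      · simp [hlt]
  · simp [hc]
termination_by curr.toNat
decreasing_by all_goals omega

theorem pvGet_step (predecessors : List Int)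
    (H : ∀ i : Nat, i < predecessors.length → 0 < i →
      0 ≤ predecessors.getD i 0 ∧ predecessors.getD i 0 < (i : Int))
    (curr : Int) (h0 : 0 < curr) (hlt : curr < (predecessors.length : Int)) :
    ∃ prev, PySem.List.pyGet? predecessors curr = some prev ∧ 0 ≤ prev ∧ prev < curr := by
  have hnn : 0 ≤ curr := le_of_lt h0
  have hle : curr.toNat < predecessors.length := by omega
  refine ⟨predecessors[curr.toNat], ?_, ?_, ?_⟩
  · exact PySem.List.pyGet?_eq_some_getElem predecessors hnn hlt
  · have := (H curr.toNat hle (by omega)).1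
    rw [List.getD_eq_getElem _ _ hle] at this
    omega
  · have := (H curr.toNat hle (by omega)).2
    rw [List.getD_eq_getElem _ _ hle] at this
    omega

-- chain structure under Pre_
theorem pvChain_head (predecessors : List Int) (c : Int) :
    ∃ r, pvChain predecessors c = c :: r := by
  rw [pvChain]
  by_cases hc : 0 < c
  · simp only [hc, if_true]
    cases hg : PySem.List.pyGet? predecessors c with
    | none => exact ⟨[], rfl⟩
    | some p =>
      by_cases hlt : p < c
      · exact ⟨pvChain predecessors p, by simp [hlt]⟩
      · exact ⟨[], by simp [hlt]⟩
  · exact ⟨[], by simp [hc]⟩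

theorem pvChain_bounds (predecessors : List Int) (c : Int) :
    ∀ x ∈ pvChain predecessors c, x ≤ c := by
  intro x hx
  rw [pvChain] at hx
  by_cases hc : 0 < c
  · simp only [hc, if_true] at hx
    cases hg : PySem.List.pyGet? predecessors c with
    | none => rw [hg] at hx; simp at hx; omega
    | some p =>
      rw [hg] at hx
      by_cases hlt : p < c
      · simp only [hlt, dif_pos, List.mem_cons] at hx
        rcases hx with h | h
        · omega
        · have := pvChain_bounds predecessors p x h
          omega
      · simp [hlt] at hx; omega
  · simp [hc] at hx; omega
termination_by c.toNat
decreasing_by all_goals omega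

theorem pvChain_last (predecessors : List Int)
    (H : ∀ i : Nat, i < predecessors.length → 0 < i →
      0 ≤ predecessors.getD i 0 ∧ predecessors.getD i 0 < (i : Int))
    (c : Int) (h0 : 0 ≤ c) (hlt : c < (predecessors.length : Int)) :
    (pvChain predecessors c).getLast? = some 0 := by
  rw [pvChain]
  by_cases hc : 0 < c
  · obtain ⟨p, hg, hp0, hp⟩ := pvGet_step predecessors H c hc hlt
    simp only [hc, if_true, hg, hp, dif_pos]
    obtain ⟨r, hr⟩ := pvChain_head predecessors p
    have ih := pvChain_last predecessors H p hp0 (by omega)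
    rw [hr] at ih ⊢
    simpa using ih
  · have hc0 : c = 0 := by omega
    simp [hc0]
termination_by c.toNat
decreasing_by all_goals omega

theorem pvChain_pairwise (predecessors : List Int) (c : Int) :
    (pvChain predecessors c).Pairwise (· > ·) := by
  rw [pvChain]
  by_cases hc : 0 < c
  · simp only [hc, if_true]
    cases hg : PySem.List.pyGet? predecessors c with
    | none => simp
    | some p =>
      by_cases hlt : p < c
      · simp only [hlt, dif_pos]
        refine List.Pairwise.cons ?_ (pvChain_pairwise predecessors p)
        intro x hx
        have := pvChain_bounds predecessors p x hx
        omega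
      · simp [hlt]
  · simp [hc]
termination_by c.toNat
decreasing_by all_goals omega

-- cut-set membership = positive chain membership
theorem pvCut_mem (predecessors : List Int)
    (H : ∀ i : Nat, i < predecessors.length → 0 < i →
      0 ≤ predecessors.getD i 0 ∧ predecessors.getD i 0 < (i : Int))
    (c : Int) (hlt : c < (predecessors.length : Int)) (s : PySem.Set Int) :
    ∀ x, x ∈ pvCutB predecessors c s ↔ x ∈ s ∨ (x ∈ pvChain predecessors c ∧ 0 < x) := by
  intro x
  rw [pvCutB, pvChain]
  by_cases hc : 0 < c
  · obtain ⟨p, hg, hp0, hp⟩ := pvGet_step predecessors H c hc (by omega)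
    simp only [hc, if_true, hg, hp, dif_pos]
    rw [pvCut_mem predecessors H p (by omega) _ x]
    rw [PySem.Set.mem_add]
    simp only [List.mem_cons]
    constructor
    · rintro ((h | h) | ⟨h, h0⟩)
      · exact Or.inl h
      · exact Or.inr ⟨Or.inl h, by omega⟩
      · exact Or.inr ⟨Or.inr h, h0⟩
    · rintro (h | ⟨(h | h), h0⟩)
      · exact Or.inl (Or.inl h)
      · exact Or.inl (Or.inr h)
      · exact Or.inr ⟨h, h0⟩
  · simp only [hc, if_false, List.mem_singleton]
    constructor
    · intro h; exact Or.inl h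
    · rintro (h | ⟨h, h0⟩)
      · exact h
      · omega
termination_by c.toNat
decreasing_by all_goals omega

theorem pvZip_append (f : Int × Int → List Int) (bs : List Int) (c p : Int)
    (h : bs.getLast? = some p) :
    ((bs ++ [c]).zip (bs ++ [c]).tail).map f = ((bs.zip bs.tail).map f) ++ [f (p, c)] := by
  induction bs with
  | nil => simp at h
  | cons a t ih =>
    cases t with
    | nil => simp_all
    | cons b t' =>
      have h' : (b :: t').getLast? = some p := by simpa using h
      have ih' := ih h'
      simp only [List.cons_append, List.tail_cons, List.zip_cons_cons, List.map_cons,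
        List.cons_append] at ih' ⊢
      simp [ih']

-- A's reversed walk = slices between consecutive reversed-chain boundaries
theorem pvMain (tour predecessors : List Int)
    (H : ∀ i : Nat, i < predecessors.length → 0 < i →
      0 ≤ predecessors.getD i 0 ∧ predecessors.getD i 0 < (i : Int))
    (curr : Int) (hlt : curr < (predecessors.length : Int)) :
    (pvWalkA tour predecessors curr []).reverse =
      (((pvChain predecessors curr).reverse.zip
          (pvChain predecessors curr).reverse.tail).map
        (fun p => PySem.List.slice tour (some p.1) (some p.2))) := by
  by_cases hc : 0 < curr
  · obtain ⟨prev, hg, hp0, hp⟩ := pvGet_step predecessors H curr hc hlt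
    rw [pvWalkA, pvChain]
    simp only [hc, if_true, hg, hp, dif_pos]
    rw [pvWalkA_acc]
    obtain ⟨r, hr⟩ := pvChain_head predecessors prev
    have hlast : (pvChain predecessors prev).reverse.getLast? = some prev := by
      rw [List.getLast?_reverse, hr]; rfl
    have hz := pvZip_append (fun p => PySem.List.slice tour (some p.1) (some p.2))
      ((pvChain predecessors prev).reverse) curr prev hlast
    have ihm := pvMain tour predecessors H prev (by omega)
    simp only [List.nil_append, List.reverse_cons, List.singleton_append] at *
    rw [hz, ihm]
  · rw [pvWalkA, pvChain]
    simp [hc]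
termination_by curr.toNat
decreasing_by all_goals omega

-- the forward scan never cuts when no index of the block is in the cut set
theorem pvScan_nocut (cut : PySem.Set Int) (xs : List Int) (a : Int) (segs : List (List Int)) (seg : List Int)
    (h : ∀ i : Int, a ≤ i → i < a + xs.length → PySem.Set.contains cut i = false) :
    (PySem.List.enumerate xs a).foldl
      (fun st p =>
        let st' := if PySem.Set.contains cut p.1 then (st.1 ++ [st.2], ([] : List Int)) else st
        (st'.1, st'.2 ++ [p.2])) (segs, seg) = (segs, seg ++ xs) := by
  induction xs generalizing a seg with
  | nil => simp [PySem.List.enumerate_nil]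
  | cons x t ih =>
    rw [PySem.List.enumerate_cons, List.foldl_cons]
    have hl : (x :: t).length = t.length + 1 := rfl
    have hfa : PySem.Set.contains cut a = false := by
      apply h a le_rfl
      rw [hl]; push_cast; omega
    simp only [hfa, Bool.false_eq_true, if_false]
    rw [ih (a + 1) (seg ++ [x]) ?hh]
    · simp
    case hh =>
      intro i h1 h2
      apply h i (by omega)
      rw [hl]; omega

-- the forward scan = pvSplit on the cut indices, in order
theorem pvScan_split (cut : PySem.Set Int) :
    ∀ (cs : List Int) (a : Int) (xs : List Int) (segs : List (List Int)) (seg : List Int),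
    cs.Pairwise (· < ·) →
    (∀ x ∈ cs, a ≤ x ∧ x < a + xs.length) →
    (∀ i : Int, a ≤ i → i < a + xs.length → (PySem.Set.contains cut i = true ↔ i ∈ cs)) →
    (let r := (PySem.List.enumerate xs a).foldl
      (fun st p =>
        let st' := if PySem.Set.contains cut p.1 then (st.1 ++ [st.2], ([] : List Int)) else st
        (st'.1, st'.2 ++ [p.2])) (segs, seg)
     r.1 ++ [r.2]) = segs ++ pvSplit cs a xs seg := by
  intro cs
  induction cs with
  | nil =>
    intro a xs segs seg hpw hbd hC
    rw [pvScan_nocut cut xs a segs seg ?hf]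
    · simp [pvSplit]
    case hf =>
      intro i h1 h2
      have := (hC i h1 h2)
      simp only [List.not_mem_nil, iff_false] at this
      exact Bool.not_eq_true _ ▸ (by simpa using this)
  | cons c rest ih =>
    intro a xs segs seg hpw hbd hC
    obtain ⟨hac, hclen⟩ := hbd c List.mem_cons_self
    have hk : (c - a).toNat < xs.length := by omega
    have hak : a + ((c - a).toNat : Int) = c := by omega
    -- split xs at the first cut
    cases hd : xs.drop (c - a).toNat with
    | nil =>
      exfalso
      have := congrArg List.length hd
      simp at this
      omega
    | cons x t =>
      have hxs : xs = xs.take (c - a).toNat ++ (x :: t) := by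
        conv_lhs => rw [← List.take_append_drop ((c - a).toNat) xs]
        rw [hd]
      have hlt : (xs.take (c - a).toNat).length = (c - a).toNat :=
        List.length_take_of_le (by omega)
      have hlen : xs.length = (c - a).toNat + (t.length + 1) := by
        conv_lhs => rw [hxs]
        simp [hlt]
      conv_lhs => rw [hxs, PySem.List.enumerate_append, List.foldl_append]
      rw [hlt, pvScan_nocut cut _ a segs seg ?hf2]
      case hf2 =>
        intro i h1 h2
        rw [hlt] at h2
        have hin : i < a + xs.length := by omega
        have hiff := hC i h1 hin
        have hnot : i ∉ c :: rest := by
          intro hmem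
          rcases List.mem_cons.mp hmem with h | h
          · omega
          · have := List.rel_of_pairwise_cons hpw h
            omega
        simp only [hnot, iff_false] at hiff
        simpa using hiff
      rw [hak, PySem.List.enumerate_cons, List.foldl_cons]
      have hcT : PySem.Set.contains cut c = true := by
        refine (hC c hac (by omega)).mpr List.mem_cons_self
      simp only [hcT, if_true]
      rw [ih (c + 1) t (segs ++ [seg ++ xs.take (c - a).toNat]) ([] ++ [x])
        (List.Pairwise.sublist (by simp) hpw) ?hb ?hc]
      · rw [pvSplit]
        simp only [hd]
        simp
      case hb =>
        intro y hy
        have h1 := List.rel_of_pairwise_cons hpw hy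
        have h2 := (hbd y (List.mem_cons_of_mem _ hy)).2
        constructor
        · omega
        · push_cast at h2 ⊢; omega
      case hc =>
        intro i h1 h2
        have hin : i < a + xs.length := by push_cast at h2 ⊢; omega
        have hiff := hC i (by omega) hin
        rw [hiff, List.mem_cons]
        constructor
        · rintro (h | h)
          · omega
          · exact h
        · exact fun h => Or.inr h

theorem pvSplit_cons (c : Int) (rest : List Int) (a : Int) (xs seg : List Int)
    (x : Int) (t : List Int) (h : xs.drop (c - a).toNat = x :: t) :
    pvSplit (c :: rest) a xs seg =
      (seg ++ xs.take (c - a).toNat) :: pvSplit rest (c + 1) t [x] := by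
  rw [pvSplit, h]

-- pvSplit = slices between consecutive boundaries
theorem pvSplit_slices (tour : List Int) :
    ∀ (cs : List Int) (p a : Int),
    0 ≤ p → p ≤ a → a ≤ (tour.length : Int) →
    cs.Pairwise (· < ·) →
    (∀ x ∈ cs, a ≤ x ∧ x < (tour.length : Int)) →
    pvSplit cs a (tour.drop a.toNat) (PySem.List.slice tour (some p) (some a)) =
      (((p :: cs ++ [(tour.length : Int)]).zip (p :: cs ++ [(tour.length : Int)]).tail).map
        (fun q => PySem.List.slice tour (some q.1) (some q.2))) := by
  intro cs
  induction cs with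
  | nil =>
    intro p a hp0 hpa halen _ _
    have h0a : (0:Int) ≤ a := by omega
    rw [pvSplit]
    have hs1 : PySem.List.slice tour (some p) (some a) =
        (tour.drop p.toNat).take (a.toNat - p.toNat) :=
      PySem.List.slice_toNat tour hp0 h0a
    have hs2 : PySem.List.slice tour (some p) (some (tour.length : Int)) =
        (tour.drop p.toNat).take ((tour.length : Int).toNat - p.toNat) :=
      PySem.List.slice_toNat tour hp0 (by positivity)
    have hdd : tour.drop a.toNat = (tour.drop p.toNat).drop (a.toNat - p.toNat) := by
      rw [List.drop_drop, show p.toNat + (a.toNat - p.toNat) = a.toNat by omega]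
    have hfull : (tour.drop p.toNat).take ((tour.length : Int).toNat - p.toNat) =
        tour.drop p.toNat := by
      apply List.take_of_length_le
      simp only [List.length_drop]
      omega
    simp only [List.nil_append, List.cons_append, List.zip_cons_cons, List.tail_cons,
      List.zip_nil_right, List.map_cons, List.map_nil]
    rw [hs1, hs2, hfull, hdd, List.take_append_drop]
  | cons c rest ih =>
    intro p a hp0 hpa halen hpw hbd
    obtain ⟨hac, hclen⟩ := hbd c List.mem_cons_self
    have hk : a.toNat + (c - a).toNat = c.toNat := by omega
    have hcl : c.toNat < tour.length := by omega
    have hdd : (tour.drop a.toNat).drop ((c - a).toNat) = tour.drop c.toNat := by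
      rw [List.drop_drop, show a.toNat + (c - a).toNat = c.toNat by omega]
    have hgc : tour.drop c.toNat = tour[c.toNat] :: tour.drop (c.toNat + 1) :=
      List.drop_eq_getElem_cons hcl
    have hdrop1 : tour.drop (c.toNat + 1) = tour.drop (c + 1).toNat := by
      rw [show (c + 1).toNat = c.toNat + 1 by omega]
    have hsc : (tour.drop a.toNat).drop ((c - a).toNat) =
        tour[c.toNat] :: tour.drop (c + 1).toNat := by
      rw [hdd, hgc, hdrop1]
    rw [pvSplit_cons c rest a _ _ _ _ hsc]
    have hfirst : PySem.List.slice tour (some p) (some a) ++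
        (tour.drop a.toNat).take ((c - a).toNat) = PySem.List.slice tour (some p) (some c) := by
      rw [PySem.List.slice_toNat tour hp0 (by omega), PySem.List.slice_toNat tour hp0 (by omega)]
      have h1 : tour.drop a.toNat = (tour.drop p.toNat).drop (a.toNat - p.toNat) := by
        rw [List.drop_drop, show p.toNat + (a.toNat - p.toNat) = a.toNat by omega]
      rw [h1, ← List.take_add]
      congr 1
      omega
    have hseg : [tour[c.toNat]] = PySem.List.slice tour (some c) (some (c + 1)) := by
      rw [PySem.List.slice_toNat tour (by omega) (by omega)]
      have h1 : (c + 1).toNat - c.toNat = 1 := by omega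
      rw [h1, hgc]
      rfl
    have ihm := ih c (c + 1) (by omega) (by omega) (by omega)
      (hpw.sublist (by simp))
      (fun y hy => ⟨by have := List.rel_of_pairwise_cons hpw hy; omega,
        (hbd y (List.mem_cons_of_mem _ hy)).2⟩)
    rw [hfirst, hseg, ihm]
    simp only [List.cons_append, List.zip_cons_cons, List.tail_cons, List.map_cons]

-- ===== VERDICT (by name: the statement is the Claim_ definition above) =====
theorem predecessors_to_segments_spec : Claim_equal_predecessors_to_segments := by
  intro tour ps _hdom hpre
  unfold Spec_predecessors_to_segments predecessors_to_segments predecessors_to_segments_alt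
  by_cases hg : tour = [] ∨ ps.length ≠ tour.length + 1
  · simp [hg]
  · simp only [hg, if_false]
    push Not at hg
    obtain ⟨hne, hlen⟩ := hg
    have H : ∀ i : Nat, i < ps.length → 0 < i →
        0 ≤ ps.getD i 0 ∧ ps.getD i 0 < (i : Int) := by
      rcases hpre with h | h | h
      · exact absurd h hne
      · exact absurd hlen h
      · exact h
    have htpos : 0 < tour.length := List.length_pos_of_ne_nil hne
    have hn1 : (1 : Int) ≤ (tour.length : Int) := by exact_mod_cast htpos
    have hltn : (tour.length : Int) < (ps.length : Int) := by
      rw [hlen]; push_cast; omega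
    -- chain decomposition: (pvChain ps n).reverse = 0 :: cs ++ [n]
    obtain ⟨r, hch⟩ := pvChain_head ps (tour.length : Int)
    have hlast := pvChain_last ps H (tour.length : Int) (by omega) hltn
    have hhead : (pvChain ps (tour.length : Int)).reverse.head? = some 0 := by
      rw [List.head?_reverse]; exact hlast
    have hlastr : (pvChain ps (tour.length : Int)).reverse.getLast? =
        some (tour.length : Int) := by
      rw [List.getLast?_reverse, hch]; rfl
    cases hrl : (pvChain ps (tour.length : Int)).reverse with
    | nil => rw [hrl] at hhead; cases hhead
    | cons z rtl =>
    have hz : z = 0 := by rw [hrl] at hhead; simpa using hhead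
    have hrtl : rtl ≠ [] := by
      intro hnil
      rw [hrl, hnil] at hlastr
      simp at hlastr
      omega
    have hrtll : rtl.getLast? = some (tour.length : Int) := by
      rw [hrl] at hlastr
      cases rtl with
      | nil => exact absurd rfl hrtl
      | cons b t => rwa [List.getLast?_cons_cons] at hlastr
    have hdecomp : (pvChain ps (tour.length : Int)).reverse =
        0 :: rtl.dropLast ++ [(tour.length : Int)] := by
      rw [hrl, hz]
      have h1 := List.dropLast_append_getLast hrtl
      have h2 : rtl.getLast hrtl = (tour.length : Int) := by
        have h3 := List.getLast?_eq_getLast_of_ne_nil hrtl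
        rw [hrtll] at h3
        exact (Option.some_injective _ h3.symm)
      rw [← h2]
      simp [h1]
    -- pairwise facts
    have hpwrl : (pvChain ps (tour.length : Int)).reverse.Pairwise (· < ·) := by
      rw [List.pairwise_reverse]
      exact pvChain_pairwise ps (tour.length : Int)
    rw [hdecomp] at hpwrl
    rw [List.cons_append, List.pairwise_cons] at hpwrl
    obtain ⟨h0all, pw2⟩ := hpwrl
    rw [List.pairwise_append] at pw2
    obtain ⟨pwcs, _, hcsn⟩ := pw2
    have hbnd : ∀ x ∈ rtl.dropLast, (0:Int) ≤ x ∧ x < 0 + (tour.length : Int) := by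
      intro x hx
      refine ⟨le_of_lt (h0all x (List.mem_append_left _ hx)), ?_⟩
      have := hcsn x hx (tour.length : Int) (List.mem_singleton.mpr rfl)
      omega
    -- cut-set membership
    have hCmem : ∀ i : Int, 0 ≤ i → i < 0 + (tour.length : Int) →
        (PySem.Set.contains (pvCutB ps (tour.length : Int) PySem.Set.empty) i = true ↔
          i ∈ rtl.dropLast) := by
      intro i h0 hi
      rw [PySem.Set.contains_iff,
        pvCut_mem ps H (tour.length : Int) hltn PySem.Set.empty i]
      have hmemrl : i ∈ pvChain ps (tour.length : Int) ↔
          i ∈ (pvChain ps (tour.length : Int)).reverse := (List.mem_reverse).symm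
      rw [hmemrl, hdecomp]
      simp only [PySem.Set.empty, List.not_mem_nil, false_or, List.cons_append,
        List.mem_cons, List.mem_append]
      constructor
      · rintro ⟨hmem, hpos⟩
        have hi0 : i ≠ 0 := by omega
        have hin : i ≠ (tour.length : Int) := by omega
        simp only [hi0, false_or] at hmem
        rcases hmem with h | h
        · exact h
        · simp [hin] at h
      · intro h
        exact ⟨Or.inr (Or.inl h), h0all i (List.mem_append_left _ h)⟩
    -- A side
    rw [pvMain tour ps H (tour.length : Int) hltn]
    -- B side
    rw [pvScan_split (pvCutB ps (tour.length : Int) PySem.Set.empty) rtl.dropLast 0 tour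
      [] [] pwcs (by simpa using hbnd) (by simpa using hCmem)]
    have hsl00 : PySem.List.slice tour (some (0:Int)) (some (0:Int)) = [] := by
      rw [PySem.List.slice_toNat tour le_rfl le_rfl]
      simp
    have hsplit := pvSplit_slices tour rtl.dropLast 0 0 le_rfl le_rfl (by omega)
      pwcs (by simpa using hbnd)
    rw [hsl00] at hsplit
    simp only [Int.toNat_zero, List.drop_zero] at hsplit
    rw [hsplit, hdecomp]
    simp
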